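-- pv_equiv track=rewrite | github.com/zzw922cn/Automatic_Speech_Recognition | speechvalley/feature/madarian/digit2character.py | _replaceInteger
-- ===== SOURCE A (Python) =====
-- def _replaceInteger(integer_set, sub_str):
--     '''
--     Replacing integer numbers with Chinese expression
--     '''
--     int_str_set = []
--     for inte in integer_set:
--         int_str=_integer2Chinese(int(inte))
--         int_str_set.append(int_str)
--     newStr=''
--     count=0
--     for c in sub_str:
--         if c=='_':
--             newStr+=int_str_set[count]
--             count+=1
--         else:
--             newStr+=c
--     return newStr
--
-- def _section2Chinese(section):
--     '''
--     Converting section to Chinese expression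
--     '''
--     result=''
--     charNumSet=['零', '一', '二', '三', '四',
--                 '五', '六', '七', '八', '九']
--     charUnitSet=['', '十', '百', '千']
--     zero=True
--     unitPos=0
--     while section>0:
--         v=section%10
--         if v==0:
--             if section==0 or zero is False:
--                 zero=True
--                 result=charNumSet[v]+result
--         elif (section//10)==0 and v==1 and unitPos==1:
--             result=charUnitSet[1]+result
--         else:
--             zero=False
--             strIns=charNumSet[v]
--             strIns+=charUnitSet[unitPos]
--             result=strIns+result
--         unitPos+=1
--         section=section//10
--     return result
--
-- def _integer2Chinese(number):
--     '''
--     Converting integer to Chinese expression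
--     '''
--     charSectionSet=['', '万', '亿', '万亿']
--     result=''
--     zero=False
--     unitPos=0
--     if number==0:
--         return '零'
--     while number>0:
--         section=number%10000
--         if zero:
--             result='零'+result
--         sec_result = _section2Chinese(section)
--         if section!=0:
--             sec_result+=charSectionSet[unitPos]
--         result=sec_result+result
--         if section<1000 and section>0:
--             zero=True
--         number=number//10000
--         unitPos+=1
--     return result
-- ===== SOURCE B (Python) =====
-- def _sectionToChinese(s):
--     nums = '零一二三四五六七八九'
--     units = ['', '十', '百', '千']
--     res = ''
--     pending = False
--     for u in (3, 2, 1, 0):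
--         d = s // 10 ** u % 10
--         if d == 0:
--             if res:
--                 pending = True
--         else:
--             if pending:
--                 res += '零'
--                 pending = False
--             if d == 1 and u == 1 and not res:
--                 res += '十'
--             else:
--                 res += nums[d] + units[u]
--     return res
--
-- def _integerToChinese(n):
--     if n == 0:
--         return '零'
--     secs = []
--     while n > 0:
--         secs.append(n % 10000)
--         n //= 10000
--     flags = []
--     z = False
--     for s in secs:
--         flags.append(z)
--         z = z or 0 < s < 1000
--     sect = ['', '万', '亿', '万亿']
--     out = ''
--     for k, (sec, f) in enumerate(zip(secs, flags)):
--         piece = (_sectionToChinese(sec) + sect[k] if sec != 0 else '') + ('零' if f else '')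
--         out = piece + out
--     return out
--
-- def _replaceInteger(integer_set, sub_str):
--     '''
--     Replacing integer numbers with Chinese expression
--     '''
--     int_str_set = [_integerToChinese(int(inte)) for inte in integer_set]
--     parts = sub_str.split('_')
--     pieces = [parts[0]]
--     for i, part in enumerate(parts[1:]):
--         pieces.append(int_str_set[i])
--         pieces.append(part)
--     return ''.join(pieces)
-- ===== Notes on version B (the rewrite author's own statement) =====
-- stated objective: alternative
-- what changed: All three stages are re-decomposed: sections are converted by scanning the four digits high-to-low with a pending-zero flag instead of A's low-to-high loop that prepends with a mutated zero flag; the integer is split into precomputed section and zero-flag lists that are zipped and assembled, instead of A's single mutating while-loop; and the '_' replacement splits the string once on '_' and interleaves the converted numbers between the segments instead of scanning char-by-char with a counter.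
import Mathlib
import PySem

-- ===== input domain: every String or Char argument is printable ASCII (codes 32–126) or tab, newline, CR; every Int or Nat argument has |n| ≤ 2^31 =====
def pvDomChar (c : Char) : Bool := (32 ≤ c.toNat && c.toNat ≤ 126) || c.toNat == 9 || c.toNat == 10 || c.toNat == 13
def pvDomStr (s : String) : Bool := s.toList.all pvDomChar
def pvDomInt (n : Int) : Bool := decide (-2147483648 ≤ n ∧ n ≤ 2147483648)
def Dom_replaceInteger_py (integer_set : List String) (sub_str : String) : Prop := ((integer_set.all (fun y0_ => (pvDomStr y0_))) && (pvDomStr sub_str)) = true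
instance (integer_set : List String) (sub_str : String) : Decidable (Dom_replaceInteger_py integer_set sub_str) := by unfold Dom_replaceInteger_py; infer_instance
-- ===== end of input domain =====

-- B replaces A's mutating low-to-high digit/section scans by staged passes: digits high-to-low
-- with a pending-zero flag for sections, precomputed section/flag lists zipped for integers,
-- and split-on-'_' interleaving for the replacement (objective: alternative decomposition).


-- ===== PORT A =====
-- A's module helpers (_section2Chinese / _integer2Chinese), ported over List Char
def pvCharNum : List (List Char) :=
  [['零'], ['一'], ['二'], ['三'], ['四'], ['五'], ['六'], ['七'], ['八'], ['九']]
def pvCharUnit : List (List Char) := [[], ['十'], ['百'], ['千']]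
def pvCharSection : List (List Char) := [[], ['万'], ['亿'], ['万', '亿']]

-- the 'while section>0' loop of _section2Chinese (section stays ≥ 0, so carried as Nat);
-- structural on a fuel argument (sec strictly decreases each step, so fuel = sec suffices;
-- the fuel is only a totality guard, never reached before sec = 0)
def pvSecLoop (fuel : Nat) (sec : Nat) (zero : Bool) (unitPos : Nat) (result : List Char) :
    List Char :=
  match fuel with
  | 0 => result
  | fuel + 1 =>
    if 0 < sec then
      let v := sec % 10
      if v = 0 then
        if sec = 0 ∨ zero = false then
          pvSecLoop fuel (sec / 10) true (unitPos + 1) (pvCharNum.getD v [] ++ result)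
        else
          pvSecLoop fuel (sec / 10) zero (unitPos + 1) result
      else if sec / 10 = 0 ∧ v = 1 ∧ unitPos = 1 then
        pvSecLoop fuel (sec / 10) zero (unitPos + 1) (pvCharUnit.getD 1 [] ++ result)
      else
        pvSecLoop fuel (sec / 10) false (unitPos + 1)
          ((pvCharNum.getD v [] ++ pvCharUnit.getD unitPos []) ++ result)
    else result

def pvSection2Chinese (secn : Nat) : List Char := pvSecLoop secn secn true 0 []

-- the 'while number>0' loop of _integer2Chinese (number ≥ 0 inside the loop, carried as Nat)
def pvIntLoop (number : Nat) (zero : Bool) (unitPos : Nat) (result : List Char) : List Char :=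
  if h : 0 < number then
    let secn := number % 10000
    let result1 := if zero then '零' :: result else result
    let secRes := pvSection2Chinese secn
    let secRes1 := if secn ≠ 0 then secRes ++ pvCharSection.getD unitPos [] else secRes
    pvIntLoop (number / 10000) (if secn < 1000 ∧ 0 < secn then true else zero)
      (unitPos + 1) (secRes1 ++ result1)
  else result
termination_by number
decreasing_by exact Nat.div_lt_self h (by norm_num)

-- _integer2Chinese; for number < 0 the Python while-loop never runs and '' is returned,
-- which Int.toNat = 0 reproduces
def pvInteger2Chinese (n : Int) : List Char :=
  if n = 0 then ['零'] else pvIntLoop n.toNat false 0 []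

-- A's 'for c in sub_str' loop: newStr/count accumulators; int_str_set[count] is in range
-- under Pre_, out of range Python raises (excluded), here getD
def pvReplaceLoop (strs : List (List Char)) (cs : List Char) (count : Nat) (acc : List Char) :
    List Char :=
  match cs with
  | [] => acc
  | c :: rest =>
    if c = '_' then pvReplaceLoop strs rest (count + 1) (acc ++ strs.getD count [])
    else pvReplaceLoop strs rest count (acc ++ [c])

def replaceInteger_py (integer_set : List String) (sub_str : String) : String :=
  let int_str_set := integer_set.map (fun inte => pvInteger2Chinese ((PySem.Int.ofStr? inte).getD 0))
  String.ofList (pvReplaceLoop int_str_set sub_str.toList 0 [])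

-- ===== PORT B =====
-- Source B's tables: one string of numeral characters, unit/section lists
def pvBNums : List Char := "零一二三四五六七八九".toList
def pvBUnits : List (List Char) := [[], ['十'], ['百'], ['千']]
def pvBSect : List (List Char) := [[], ['万'], ['亿'], ['万', '亿']]

-- Source B's _sectionToChinese: digits scanned high→low (u = 3,2,1,0), pending-zero flag
def pvBSection (s : Nat) : List Char :=
  (([3, 2, 1, 0] : List Nat).foldl
    (fun (st : List Char × Bool) u =>
      let d := s / 10 ^ u % 10
      if d = 0 then
        (st.1, if st.1 ≠ [] then true else st.2)
      else
        let res := if st.2 then st.1 ++ ['零'] else st.1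
        if d = 1 ∧ u = 1 ∧ res = [] then (res ++ ['十'], false)
        else (res ++ ([pvBNums.getD d ' '] ++ pvBUnits.getD u []), false))
    ([], false)).1

-- Source B: secs = low→high 4-digit sections of n ('while n>0' collecting n%10000)
def pvBSecsOf (n : Nat) : List Nat :=
  if h : 0 < n then n % 10000 :: pvBSecsOf (n / 10000) else []
termination_by n
decreasing_by exact Nat.div_lt_self h (by norm_num)

-- Source B: flags.append(z); z = z or 0<s<1000  — the list of entry flags, one per section
def pvBFlags (z : Bool) : List Nat → List Bool
  | [] => []
  | s :: ss => z :: pvBFlags (if 0 < s ∧ s < 1000 then true else z) ss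

-- Source B's assembly loop: out = piece + out over enumerate(zip(secs, flags))
def pvBInteger (n : Int) : List Char :=
  if n = 0 then ['零'] else
    let secs := pvBSecsOf n.toNat
    let flags := pvBFlags false secs
    ((secs.zip flags).zipIdx.foldl
      (fun out x =>
        ((if x.1.1 ≠ 0 then pvBSection x.1.1 ++ pvBSect.getD x.2 [] else []) ++
          (if x.1.2 then ['零'] else [])) ++ out)
      [])

-- Source B's _replaceInteger: split on '_' (List.splitOn, same semantics incl. empty pieces),
-- then interleave int_str_set[i] between the segments and join
def replaceInteger_py_alt (integer_set : List String) (sub_str : String) : String :=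
  let int_str_set := integer_set.map (fun inte => pvBInteger ((PySem.Int.ofStr? inte).getD 0))
  let parts := List.splitOn '_' sub_str.toList
  let pieces := (PySem.List.enumerate parts.tail).foldl
      (fun ps pr => ps ++ [PySem.List.pyGetD int_str_set pr.1 [], pr.2]) [parts.headD []]
  String.ofList (PySem.Chars.join [] pieces)

-- ===== PRECONDITION & SPEC =====
-- Pre_ excludes exactly the inputs where the Python raises: a ValueError when some element of
-- integer_set is not int-parsable, and an IndexError either when sub_str has more '_' than
-- integer_set has elements or when a parsed integer is ≥ 10^16 (charSectionSet[unitPos] with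
-- unitPos > 3 inside _integer2Chinese).
def Pre_replaceInteger_py (integer_set : List String) (sub_str : String) : Prop :=
  (∀ s ∈ integer_set,
      (PySem.Int.ofStr? s).isSome = true ∧ (PySem.Int.ofStr? s).getD 0 < 10 ^ 16) ∧
  sub_str.toList.count '_' ≤ integer_set.length
instance (integer_set : List String) (sub_str : String) :
    Decidable (Pre_replaceInteger_py integer_set sub_str) := by
  unfold Pre_replaceInteger_py; infer_instance

def pvWitness_replaceInteger_py : List String × String := (["12", "305"], "a_b _")

def Spec_replaceInteger_py (integer_set : List String) (sub_str : String) (out : String) : Prop :=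
  out = replaceInteger_py_alt integer_set sub_str
instance (integer_set : List String) (sub_str : String) (out : String) :
    Decidable (Spec_replaceInteger_py integer_set sub_str out) := by
  unfold Spec_replaceInteger_py; infer_instance

-- ===== CLAIM (what is proved, stated in full; the proofs are below) =====
def Claim_equal_replaceInteger_py : Prop := ∀ (integer_set : List String) (sub_str : String), Dom_replaceInteger_py integer_set sub_str → Pre_replaceInteger_py integer_set sub_str → Spec_replaceInteger_py integer_set sub_str (replaceInteger_py integer_set sub_str)

-- ===== LEMMAS AND PROOFS =====

-- section conversion: B's high→low digit scan equals A's low→high loop on every section value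
set_option maxRecDepth 10000 in
set_option maxHeartbeats 4000000 in
theorem pvSection_eq4 : ∀ a b c d : Fin 10,
    pvBSection (1000 * a.1 + 100 * b.1 + 10 * c.1 + d.1) =
      pvSection2Chinese (1000 * a.1 + 100 * b.1 + 10 * c.1 + d.1) := by decide

theorem pvSection_eq' (s : Nat) (h : s < 10000) : pvBSection s = pvSection2Chinese s := by
  have hd : s = 1000 * (s / 1000) + 100 * (s / 100 % 10) + 10 * (s / 10 % 10) + s % 10 := by
    omega
  have h1 : s / 1000 < 10 := by omega
  have h2 : s / 100 % 10 < 10 := by omega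
  have h3 : s / 10 % 10 < 10 := by omega
  have h4 : s % 10 < 10 := by omega
  rw [hd]
  exact pvSection_eq4 ⟨_, h1⟩ ⟨_, h2⟩ ⟨_, h3⟩ ⟨_, h4⟩

-- proof-side spec of the integer loop on the section list (A's exact per-iteration pieces)
def pvG : List Nat → Bool → Nat → List Char
  | [], _, _ => []
  | s :: ss, z, k =>
      pvG ss (if s < 1000 ∧ 0 < s then true else z) (k + 1) ++
        (if s ≠ 0 then pvSection2Chinese s ++ pvCharSection.getD k [] else pvSection2Chinese s) ++
        (if z then ['零'] else [])

theorem pvIntLoop_eq (n : Nat) : ∀ z k res,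
    pvIntLoop n z k res = pvG (pvBSecsOf n) z k ++ res := by
  induction n using Nat.strong_induction_on with
  | _ n ih =>
    intro z k res
    by_cases h : 0 < n
    · rw [pvIntLoop, pvBSecsOf]
      simp only [dif_pos h]
      rw [ih (n / 10000) (Nat.div_lt_self h (by norm_num))]
      simp only [pvG]
      split_ifs <;> simp_all
    · rw [pvIntLoop, pvBSecsOf]
      simp [h, pvG]

theorem pvBSecsOf_lt (n : Nat) : ∀ s ∈ pvBSecsOf n, s < 10000 := by
  induction n using Nat.strong_induction_on with
  | _ n ih =>
    intro s hs
    rw [pvBSecsOf] at hs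
    by_cases h : 0 < n
    · rw [dif_pos h] at hs
      rcases List.mem_cons.mp hs with hs' | hs'
      · omega
      · exact ih (n / 10000) (Nat.div_lt_self h (by norm_num)) s hs'
    · simp [dif_neg h] at hs

theorem pvAssemble_eq (secs : List Nat) (hs : ∀ s ∈ secs, s < 10000) : ∀ z k out,
    ((secs.zip (pvBFlags z secs)).zipIdx k).foldl
      (fun out x =>
        ((if x.1.1 ≠ 0 then pvBSection x.1.1 ++ pvBSect.getD x.2 [] else []) ++
          (if x.1.2 then ['零'] else [])) ++ out) out
      = pvG secs z k ++ out := by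
  induction secs with
  | nil => intro z k out; simp [pvBFlags, pvG]
  | cons s ss ih =>
    intro z k out
    simp only [pvBFlags, List.zip_cons_cons, List.zipIdx_cons, List.foldl_cons]
    rw [ih (fun t ht => hs t (List.mem_cons_of_mem _ ht))]
    have hsec : pvBSection s = pvSection2Chinese s :=
      pvSection_eq' s (hs s (List.mem_cons_self ..))
    have hzero : pvSection2Chinese 0 = [] := rfl
    have htbl : pvBSect = pvCharSection := rfl
    simp only [pvG, hsec, htbl]
    by_cases h0 : s = 0
    · subst h0; simp [hzero]
    · simp [h0, Bool.and_comm]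

theorem pvBInteger_eq (n : Int) : pvBInteger n = pvInteger2Chinese n := by
  unfold pvBInteger pvInteger2Chinese
  by_cases h : n = 0
  · simp [h]
  · simp only [if_neg h]
    rw [pvIntLoop_eq, pvAssemble_eq _ (pvBSecsOf_lt n.toNat)]

-- proof-side skeleton of the replacement: splice strs[count], strs[count+1], … between parts
def pvSplice (strs : List (List Char)) (count : Nat) (parts : List (List Char)) : List Char :=
  match parts with
  | [] => []
  | p :: ps => strs.getD count [] ++ p ++ pvSplice strs (count + 1) ps

theorem pvJoinNil (ps : List (List Char)) : PySem.Chars.join [] ps = ps.flatten := by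
  induction ps with
  | nil => rfl
  | cons p ps ih => cases ps <;> simp_all [PySem.Chars.join, List.intercalate, List.intersperse]

-- A's scanning loop computes head-segment ++ splice of the remaining segments
theorem pvALoop_eq (strs : List (List Char)) (cs : List Char) (count : Nat) (acc : List Char) :
    pvReplaceLoop strs cs count acc =
      acc ++ (List.splitOn '_' cs).headD [] ++
        pvSplice strs count (List.splitOn '_' cs).tail := by
  induction cs generalizing count acc with
  | nil => simp [pvReplaceLoop, List.splitOn, List.splitOnP_nil, pvSplice]
  | cons c rest ih =>
    have hsplit : List.splitOn '_' (c :: rest) =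
        if c = '_' then [] :: List.splitOn '_' rest
        else (List.splitOn '_' rest).modifyHead (List.cons c) := by
      simp [List.splitOn, List.splitOnP_cons]
    obtain ⟨q, qs, hq⟩ : ∃ q qs, List.splitOn '_' rest = q :: qs := by
      rcases h : List.splitOn '_' rest with _ | ⟨q, qs⟩
      · exact absurd h (List.splitOnP_ne_nil _ _)
      · exact ⟨q, qs, rfl⟩
    by_cases hc : c = '_'
    · simp only [pvReplaceLoop, hsplit, if_pos hc]
      rw [ih, hq]
      simp [pvSplice]
    · simp only [pvReplaceLoop, hsplit, if_neg hc]
      rw [ih, hq]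
      simp [List.modifyHead]

-- B's foldl over enumerate, once joined, is the same splice
theorem pvBFold_eq (strs : List (List Char)) (parts : List (List Char)) (count : Nat)
    (pieces : List (List Char)) :
    ((PySem.List.enumerate parts (count : Int)).foldl
        (fun ps pr => ps ++ [PySem.List.pyGetD strs pr.1 [], pr.2]) pieces).flatten =
      pieces.flatten ++ pvSplice strs count parts := by
  induction parts generalizing count pieces with
  | nil => simp [PySem.List.enumerate_nil, pvSplice]
  | cons p ps ih =>
    rw [PySem.List.enumerate_cons]
    have hcast : (count : Int) + 1 = ((count + 1 : Nat) : Int) := by push_cast; ring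
    simp only [List.foldl_cons, hcast, ih]
    rw [PySem.List.pyGetD_of_nonneg strs [] (by positivity)]
    simp [pvSplice, Int.toNat_natCast]

theorem replaceInteger_py_spec_aux (integer_set : List String) (sub_str : String) :
    replaceInteger_py integer_set sub_str = replaceInteger_py_alt integer_set sub_str := by
  dsimp only [replaceInteger_py, replaceInteger_py_alt]
  have hmap : integer_set.map (fun inte => pvBInteger ((PySem.Int.ofStr? inte).getD 0)) =
      integer_set.map (fun inte => pvInteger2Chinese ((PySem.Int.ofStr? inte).getD 0)) := by
    simp [pvBInteger_eq]
  rw [hmap, pvJoinNil, pvALoop_eq]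
  have h := pvBFold_eq
    (integer_set.map (fun inte => pvInteger2Chinese ((PySem.Int.ofStr? inte).getD 0)))
    (List.splitOn '_' sub_str.toList).tail 0 [(List.splitOn '_' sub_str.toList).headD []]
  rw [Int.natCast_zero] at h
  rw [h]
  simp

-- ===== VERDICT (by name: the statement is the Claim_ definition above) =====
theorem replaceInteger_py_spec : Claim_equal_replaceInteger_py := by
  intro integer_set sub_str _ _
  exact replaceInteger_py_spec_aux integer_set sub_str
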